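-- pv_equiv track=rewrite | github.com/rayenFathallah/Application_tracking_system | api/src/data_preprocessing/resume_preprocessing.py | remove_initial_newlines
-- ===== SOURCE A (Python) =====
-- def remove_initial_newlines(text):
--     sentence_found = False
--     new_text = ''
--
--     for char in text:
--         if not sentence_found:
--             if char == '\n':
--                 continue
--             else:
--                 sentence_found = True
--                 new_text += char
--         else:
--             new_text += char
--
--     return new_text
-- ===== SOURCE B (Python) =====
-- def remove_initial_newlines(text):
--     for i, char in enumerate(text):
--         if char != '\n':
--             return text[i:]
--     return ''
-- ===== Notes on version B (the rewrite author's own statement) =====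
-- stated objective: faster
-- what changed: B finds the index of the first non-newline character and returns one slice from there, instead of accumulating the whole tail character by character through a flag-driven loop (avoids repeated string concatenation).
import Mathlib
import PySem

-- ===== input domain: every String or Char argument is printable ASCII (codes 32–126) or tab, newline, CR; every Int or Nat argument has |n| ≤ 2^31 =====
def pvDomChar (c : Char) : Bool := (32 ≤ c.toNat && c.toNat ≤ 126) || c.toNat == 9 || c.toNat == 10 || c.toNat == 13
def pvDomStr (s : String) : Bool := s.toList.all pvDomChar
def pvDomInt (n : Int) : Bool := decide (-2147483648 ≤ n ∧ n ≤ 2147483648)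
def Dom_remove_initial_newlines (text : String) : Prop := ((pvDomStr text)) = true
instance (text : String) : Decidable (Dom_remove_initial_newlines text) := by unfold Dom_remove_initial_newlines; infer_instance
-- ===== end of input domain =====

-- B replaces A's flag-driven character-by-character accumulation with finding the first
-- non-newline index and returning a single slice from there (same return value).

-- ===== PORT A =====
-- flag loop: state (sentence_found, new_text); skip '\n' until a real char is seen, then copy.
def rinStep (st : Bool × List Char) (char : Char) : Bool × List Char :=
  if !st.1 then
    if char = '\n' then st
    else (true, st.2 ++ [char])
  else (st.1, st.2 ++ [char])

def remove_initial_newlines (text : String) : String :=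
  let st := text.toList.foldl rinStep (false, [])
  String.mk st.2

-- ===== PORT B =====
-- scan for the first index whose char is not '\n'; return text[i:] there, '' if none.
def rinAltLoop (text : String) : List Char → Nat → String
  | [], _ => ""
  | char :: rest, i =>
      if char ≠ '\n' then String.mk (PySem.List.slice text.toList (some (i : Int)) none)
      else rinAltLoop text rest (i + 1)

def remove_initial_newlines_alt (text : String) : String :=
  rinAltLoop text text.toList 0

-- ===== PRECONDITION & SPEC =====
def Spec_remove_initial_newlines (text : String) (out : String) : Prop := out = remove_initial_newlines_alt text
instance (text : String) (out : String) : Decidable (Spec_remove_initial_newlines text out) := by unfold Spec_remove_initial_newlines; infer_instance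

-- ===== CLAIM (what is proved, stated in full; the proofs are below) =====
def Claim_equal_remove_initial_newlines : Prop := ∀ (text : String), Dom_remove_initial_newlines text → Spec_remove_initial_newlines text (remove_initial_newlines text)

-- ===== LEMMAS AND PROOFS =====

theorem rin_foldl_true (cs acc : List Char) :
    cs.foldl rinStep (true, acc) = (true, acc ++ cs) := by
  induction cs generalizing acc with
  | nil => simp
  | cons c rest ih => rw [List.foldl_cons]; simp [rinStep, ih]

theorem rin_foldl_false (cs acc : List Char) :
    (cs.foldl rinStep (false, acc)).2 = acc ++ cs.dropWhile (· = '\n') := by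
  induction cs generalizing acc with
  | nil => simp
  | cons c rest ih =>
    rw [List.foldl_cons]
    by_cases h : c = '\n'
    · simp only [rinStep, h, if_pos, Bool.not_false, if_true, List.dropWhile_cons,
        decide_true, ite_true]
      exact ih acc
    · simp [rinStep, h, rin_foldl_true, List.dropWhile_cons]

theorem rinAltLoop_eq (text : String) (cs : List Char) (i : Nat)
    (h : cs = text.toList.drop i) :
    rinAltLoop text cs i = String.mk (cs.dropWhile (· = '\n')) := by
  induction cs generalizing i with
  | nil => rfl
  | cons c rest ih =>
    by_cases hc : c = '\n'
    · have hrest : rest = text.toList.drop (i + 1) := by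
        rw [← List.tail_drop, ← h]; rfl
      simp [rinAltLoop, hc, ih _ hrest]
    · simp [rinAltLoop, hc, PySem.List.slice_from_natCast, ← h, List.dropWhile_cons]

-- ===== VERDICT (by name: the statement is the Claim_ definition above) =====
theorem remove_initial_newlines_spec : Claim_equal_remove_initial_newlines := by
  intro text _
  unfold Spec_remove_initial_newlines remove_initial_newlines remove_initial_newlines_alt
  rw [rinAltLoop_eq text text.toList 0 (by simp)]
  refine congrArg String.mk ?_
  simpa using rin_foldl_false text.toList []
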